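-- pv_equiv track=rewrite | github.com/A-Faris/Museum-Visitors | coding_problems/monday/solution.py | light_bulbs
-- ===== SOURCE A (Python) =====
-- def light_bulbs(lights, n):
--     for round in range(n):
--         change = lights[-1] == 1
--         for num, i in enumerate(lights):
--             if change:
--                 if i == 1:
--                     lights[num] = 0
--                 else:
--                     lights[num] = 1
--             else:
--                 lights[num] = i
--             change = i == 1
--
--     return lights
-- ===== SOURCE B (Python) =====
-- def light_bulbs(lights, n):
--     # Bitmask simulation: one big-int XOR per round instead of a per-bulb scan;
--     # a bulb's value only leaves its original once toggled, after which it equals its bit.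
--     if not lights:
--         return lights
--     L = len(lights)
--     mask = (1 << L) - 1
--     bits = 0
--     for k, x in enumerate(lights):
--         if x == 1:
--             bits |= 1 << k
--     untouched = mask
--     for _ in range(n):
--         rot = ((bits << 1) | (bits >> (L - 1))) & mask
--         untouched &= ~rot
--         bits ^= rot
--     for k in range(L):
--         if not (untouched >> k) & 1:
--             lights[k] = (bits >> k) & 1
--     return lights
-- ===== Notes on version B (the rewrite author's own statement) =====
-- stated objective: faster
-- what changed: B replaces A's per-bulb Python loop in every round by one big-integer rotate-XOR on a bitmask of the lights (tracking which bulbs were ever toggled, since an untouched bulb keeps its original value and a touched one equals its bit), reconstructing the list once at the end.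
import Mathlib
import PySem

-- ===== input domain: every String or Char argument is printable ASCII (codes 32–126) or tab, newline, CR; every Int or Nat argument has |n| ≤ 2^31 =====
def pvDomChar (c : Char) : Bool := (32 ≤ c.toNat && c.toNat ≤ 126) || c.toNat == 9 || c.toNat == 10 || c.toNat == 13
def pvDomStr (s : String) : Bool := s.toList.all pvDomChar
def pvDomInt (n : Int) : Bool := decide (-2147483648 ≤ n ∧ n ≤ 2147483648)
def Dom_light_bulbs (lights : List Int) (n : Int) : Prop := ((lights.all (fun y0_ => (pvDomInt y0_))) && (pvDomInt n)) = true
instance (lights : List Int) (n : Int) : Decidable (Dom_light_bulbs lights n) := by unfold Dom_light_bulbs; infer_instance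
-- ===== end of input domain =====

-- B replaces A's per-bulb inner scan by one big-integer XOR per round on a bitmask (a bulb keeps its
-- original value until first toggled, afterwards it equals its bit); equivalence is about the return
-- value (in Python both A and B also write the result into `lights` in place).

-- ===== PORT A =====
-- one round of A: read lights[-1], then the enumerate loop mutating lights[num] with the carried `change` flag
def pyA_round (ls : List Int) : List Int :=
  let change := (PySem.List.pyGet? ls (-1)).getD 0 == 1
  ((PySem.List.enumerate ls 0).foldl
    (fun (st : List Int × Bool) (p : Int × Int) =>
      let cur :=
        if st.2 then
          (if p.2 == 1 then st.1.set p.1.toNat 0 else st.1.set p.1.toNat 1)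
        else st.1.set p.1.toNat p.2
      (cur, p.2 == 1)) (ls, change)).1


def light_bulbs (lights : List Int) (n : Int) : List Int :=
  (PySem.List.pyRange 0 n 1).foldl (fun ls _round => pyA_round ls) lights


-- ===== PORT B =====
-- one round of B on (bits, untouched); Python's `untouched &= ~rot` is ported as `&&& (mask ^^^ rot)`,
-- exact because untouched and rot always have all their set bits below L (both come ANDed with mask).
def pyB_step (L mask : Nat) (p : Nat × Nat) : Nat × Nat :=
  let rot := ((p.1 <<< 1) ||| (p.1 >>> (L - 1))) &&& mask
  (p.1 ^^^ rot, p.2 &&& (mask ^^^ rot))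

def light_bulbs_alt (lights : List Int) (n : Int) : List Int :=
  if lights.isEmpty then lights
  else
    let L := lights.length
    let mask := (1 <<< L) - 1
    let bits := (PySem.List.enumerate lights 0).foldl
      (fun (b : Nat) (p : Int × Int) => if p.2 == 1 then b ||| (1 <<< p.1.toNat) else b) 0
    let st := (PySem.List.pyRange 0 n 1).foldl (fun p _ => pyB_step L mask p) (bits, mask)
    (PySem.List.pyRange 0 (L : Int) 1).foldl
      (fun cur k =>
        if ((st.2 >>> k.toNat) &&& 1) == 0 then
          cur.set k.toNat (((st.1 >>> k.toNat) &&& 1 : Nat) : Int)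
        else cur) lights


-- ===== PRECONDITION & SPEC =====
-- Pre_ excludes only the inputs where Python A raises IndexError: an empty list with n ≥ 1.
def Pre_light_bulbs (lights : List Int) (n : Int) : Prop := lights = [] → n ≤ 0
instance (lights : List Int) (n : Int) : Decidable (Pre_light_bulbs lights n) := by unfold Pre_light_bulbs; infer_instance
def pvWitness_light_bulbs : List Int × Int := ([1, 0, 1, 0], 3)

def Spec_light_bulbs (lights : List Int) (n : Int) (out : List Int) : Prop := out = light_bulbs_alt lights n
instance (lights : List Int) (n : Int) (out : List Int) : Decidable (Spec_light_bulbs lights n out) := by unfold Spec_light_bulbs; infer_instance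

-- ===== CLAIM (what is proved, stated in full; the proofs are below) =====
def Claim_equal_light_bulbs : Prop := ∀ (lights : List Int) (n : Int), Dom_light_bulbs lights n → Pre_light_bulbs lights n → Spec_light_bulbs lights n (light_bulbs lights n)

-- ===== LEMMAS AND PROOFS =====

def pvTog (x : Int) : Int := if x == 1 then 0 else 1

def pvWriteAll (cur : List Int) (s : Nat) (tail : List Int) (ch : Bool) : List Int :=
  match tail with
  | [] => cur
  | x :: xs => pvWriteAll (cur.set s (if ch then pvTog x else x)) (s + 1) xs (x == 1)

theorem getD_set (l : List Int) (i k : Nat) (v : Int) :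
    (l.set i v).getD k 0 = if i = k ∧ i < l.length then v else l.getD k 0 := by
  by_cases hik : i = k
  · subst hik
    by_cases hl : i < l.length
    · simp [List.getD_eq_getElem?_getD, hl]
    · simp [List.getD_eq_getElem?_getD, hl]
  · simp [List.getD_eq_getElem?_getD, hik]

theorem innerA_eq_writeAll (tail : List Int) : ∀ (s : Nat) (cur : List Int) (ch : Bool),
    ((PySem.List.enumerate tail (s : Int)).foldl
      (fun (st : List Int × Bool) (p : Int × Int) =>
        let cur :=
          if st.2 then
            (if p.2 == 1 then st.1.set p.1.toNat 0 else st.1.set p.1.toNat 1)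
          else st.1.set p.1.toNat p.2
        (cur, p.2 == 1)) (cur, ch)).1 = pvWriteAll cur s tail ch := by
  induction tail with
  | nil => intro s cur ch; simp [PySem.List.enumerate_nil, pvWriteAll]
  | cons x xs ih =>
    intro s cur ch
    rw [PySem.List.enumerate_cons]
    have hcast : (s : Int) + 1 = ((s + 1 : Nat) : Int) := by push_cast; ring
    simp only [List.foldl_cons, hcast, ih, Int.toNat_natCast]
    rw [pvWriteAll]
    congr 1
    cases ch <;> by_cases hx : x == 1 <;> simp [pvTog, hx]


theorem getD_writeAll (tail : List Int) : ∀ (s : Nat) (cur : List Int) (ch : Bool) (k : Nat), k < cur.length →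
    (pvWriteAll cur s tail ch).getD k 0 =
      if s ≤ k ∧ k < s + tail.length then
        (if (if k = s then ch else (tail.getD (k - s - 1) 0 == 1)) then pvTog (tail.getD (k - s) 0)
         else tail.getD (k - s) 0)
      else cur.getD k 0 := by
  induction tail with
  | nil => intro s cur ch k hk; simp [pvWriteAll]
  | cons x xs ih =>
    intro s cur ch k hk
    rw [pvWriteAll, ih (s+1) _ (x == 1) k (by simpa using hk)]
    have hlen : (x :: xs).length = xs.length + 1 := by simp
    by_cases hks : k = s
    · conv_lhs => rw [if_neg (show ¬(s + 1 ≤ k ∧ k < s + 1 + xs.length) by omega)]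
      conv_lhs => rw [getD_set, if_pos (show s = k ∧ s < cur.length from ⟨hks.symm, by omega⟩)]
      conv_rhs => rw [if_pos (show s ≤ k ∧ k < s + (x :: xs).length by rw [hlen]; omega)]
      conv_rhs => rw [if_pos hks]
      rw [show k - s = 0 from by omega, List.getD_cons_zero]
    · by_cases hz : s + 1 ≤ k ∧ k < s + 1 + xs.length
      · conv_lhs => rw [if_pos hz]
        conv_rhs => rw [if_pos (show s ≤ k ∧ k < s + (x :: xs).length by rw [hlen]; omega)]
        conv_rhs => rw [if_neg hks]
        obtain ⟨m, rfl⟩ : ∃ m, k = s + 1 + m := ⟨k - s - 1, by omega⟩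
        rw [show s + 1 + m - (s + 1) = m from by omega,
            show s + 1 + m - s = m + 1 from by omega,
            List.getD_cons_succ]
        rw [show m + 1 - 1 = m from rfl]
        cases m with
        | zero =>
          conv_lhs => rw [if_pos (show s + 1 + 0 = s + 1 by omega)]
          rw [List.getD_cons_zero]
        | succ m' =>
          conv_lhs => rw [if_neg (show ¬ s + 1 + (m' + 1) = s + 1 by omega)]
          rw [List.getD_cons_succ, Nat.add_sub_cancel]
      · conv_lhs => rw [if_neg hz, getD_set,
          if_neg (show ¬(s = k ∧ s < cur.length) from fun h => hks h.1.symm)]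
        conv_rhs => rw [if_neg (show ¬(s ≤ k ∧ k < s + (x :: xs).length) by rw [hlen]; omega)]

theorem length_writeAll (tail : List Int) : ∀ s cur ch, (pvWriteAll cur s tail ch).length = cur.length := by
  induction tail with
  | nil => intro s cur ch; rfl
  | cons x xs ih => intro s cur ch; rw [pvWriteAll, ih]; simp

theorem pyGet_neg_one (ls : List Int) (h : ls ≠ []) :
    (PySem.List.pyGet? ls (-1)) = some (ls.getD (ls.length - 1) 0) := by
  have hL : 1 ≤ ls.length := List.length_pos_iff.mpr h
  simp [PySem.List.pyGet?, PySem.List.pyIdx?, hL,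
    List.getElem?_eq_getElem (show ls.length - 1 < ls.length by omega),
    List.getD_eq_getElem?_getD]

def pvRound (ls : List Int) : List Int :=
  ls.mapIdx (fun k x =>
    if (if k = 0 then ls.getD (ls.length - 1) 0 else ls.getD (k - 1) 0) == 1 then pvTog x else x)

theorem length_pvRound (ls : List Int) : (pvRound ls).length = ls.length := by
  simp [pvRound]

theorem pyA_round_eq_pvRound (ls : List Int) : pyA_round ls = pvRound ls := by
  rcases eq_or_ne ls [] with rfl | hne
  · rfl
  · unfold pyA_round
    have hinner := innerA_eq_writeAll ls 0 ls ((PySem.List.pyGet? ls (-1)).getD 0 == 1)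
    simp only [Nat.cast_zero] at hinner
    dsimp only
    rw [hinner]
    apply List.ext_getElem
    · rw [length_writeAll, length_pvRound]
    · intro k h1 h2
      rw [← List.getD_eq_getElem _ 0 h1, ← List.getD_eq_getElem _ 0 h2]
      have hk : k < ls.length := by
        have := length_writeAll ls 0 ls ((PySem.List.pyGet? ls (-1)).getD 0 == 1)
        omega
      rw [getD_writeAll ls 0 ls _ k hk, if_pos ⟨Nat.zero_le _, by omega⟩]
      rw [pyGet_neg_one ls hne]
      have hmap : (pvRound ls).getD k 0 =
          (if (if k = 0 then ls.getD (ls.length - 1) 0 else ls.getD (k - 1) 0) == 1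
            then pvTog (ls.getD k 0) else ls.getD k 0) := by
        rw [List.getD_eq_getElem _ 0 (by rw [length_pvRound]; exact hk)]
        simp only [pvRound]
        rw [List.getElem_mapIdx]
        rw [List.getD_eq_getElem _ 0 hk]
      rw [hmap]
      simp only [Nat.sub_zero, Option.getD_some]
      by_cases hk0 : k = 0 <;> simp [hk0]
theorem encode_testBit (xs : List Int) : ∀ (s : Nat) (b : Nat) (j : Nat),
    (List.foldl (fun (b : Nat) (p : Int × Int) => if p.2 == 1 then b ||| (1 <<< p.1.toNat) else b)
      b (PySem.List.enumerate xs (s : Int))).testBit j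
    = (b.testBit j || (decide (s ≤ j) && decide (j - s < xs.length) && (xs.getD (j - s) 0 == 1))) := by
  induction xs with
  | nil => intro s b j; simp [PySem.List.enumerate_nil]
  | cons x t ih =>
    intro s b j
    rw [PySem.List.enumerate_cons]
    have hcast : (s : Int) + 1 = ((s + 1 : Nat) : Int) := by push_cast; ring
    simp only [List.foldl_cons, hcast, ih, Int.toNat_natCast]
    by_cases hjs : j = s
    · subst hjs
      have h1 : ¬ (j + 1 ≤ j) := by omega
      have h2 : j - j = 0 := by omega
      simp [h1]
      by_cases hx : x = 1
      · simp [hx, Nat.testBit_shiftLeft]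
      · simp [hx]
    · by_cases hle : s ≤ j
      · have h1 : s + 1 ≤ j := by omega
        have h2 : j - s = (j - (s+1)) + 1 := by omega
        simp only [h1, hle, decide_true, Bool.true_and, h2, List.getD_cons_succ, List.length_cons]
        have h5 : (j - (s + 1)) + 1 < t.length + 1 ↔ j - (s+1) < t.length := by omega
        by_cases hx : x = 1
        · have h6 : Nat.testBit 1 (j - s) = false := by
            rw [h2]; simp [Nat.testBit_add_one]
          simp [hx, Nat.testBit_shiftLeft, h6, h5]
        · simp [hx, h5]
      · have h2 : ¬ (s + 1 ≤ j) := by omega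
        by_cases hx : x = 1
        · simp [hx, hle, h2, Nat.testBit_shiftLeft]
        · simp [hx, hle, h2]

theorem pvRound_getD (ls : List Int) (k : Nat) (hk : k < ls.length) :
    (pvRound ls).getD k 0 =
      if (if k = 0 then ls.getD (ls.length - 1) 0 else ls.getD (k - 1) 0) == 1
      then pvTog (ls.getD k 0) else ls.getD k 0 := by
  rw [List.getD_eq_getElem _ 0 (by rw [length_pvRound]; exact hk)]
  simp only [pvRound]
  rw [List.getElem_mapIdx]
  rw [List.getD_eq_getElem _ 0 hk]

def pvInv (orig ls : List Int) (b u : Nat) : Prop :=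
  ls.length = orig.length ∧
  (∀ j, orig.length ≤ j → b.testBit j = false) ∧
  (∀ j, orig.length ≤ j → u.testBit j = false) ∧
  (∀ k, k < orig.length →
     (b.testBit k = (ls.getD k 0 == 1)) ∧
     (u.testBit k = true → ls.getD k 0 = orig.getD k 0) ∧
     (u.testBit k = false → ls.getD k 0 = (if b.testBit k then 1 else 0)))

theorem pvInv_step (orig ls : List Int) (b u : Nat) (h0 : orig ≠ [])
    (h : pvInv orig ls b u) :
    pvInv orig (pvRound ls)
      (pyB_step orig.length ((1 <<< orig.length) - 1) (b, u)).1
      (pyB_step orig.length ((1 <<< orig.length) - 1) (b, u)).2 := by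
  obtain ⟨hlen, hbh, huh, hmain⟩ := h
  have hL : 0 < orig.length := List.length_pos_iff.mpr h0
  set L := orig.length with hLdef
  have hmask : (1 <<< L) - 1 = 2 ^ L - 1 := by rw [Nat.one_shiftLeft]
  -- rot bits
  set rot := ((b <<< 1) ||| (b >>> (L - 1))) &&& ((1 <<< L) - 1) with hrot
  have rotHigh : ∀ j, L ≤ j → rot.testBit j = false := by
    intro j hj
    rw [hrot, hmask, Nat.testBit_land, Nat.testBit_two_pow_sub_one]
    simp [show ¬ (j < L) from by omega]
  have rotBit : ∀ k, k < L → rot.testBit k = b.testBit (if k = 0 then L - 1 else k - 1) := by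
    intro k hk
    rw [hrot, hmask, Nat.testBit_land, Nat.testBit_two_pow_sub_one,
        Nat.testBit_lor, Nat.testBit_shiftLeft, Nat.testBit_shiftRight]
    by_cases hk0 : k = 0
    · subst hk0
      simp [show L - 1 + 0 = L - 1 from by omega, hk]
    · have h1 : b.testBit (L - 1 + k) = false := hbh _ (by omega)
      simp [h1, show k ≥ 1 from by omega, hk, hk0]
  -- step components
  have hb' : (pyB_step L ((1 <<< L) - 1) (b, u)).1 = b ^^^ rot := rfl
  have hu' : (pyB_step L ((1 <<< L) - 1) (b, u)).2 = u &&& (((1 <<< L) - 1) ^^^ rot) := rfl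
  rw [hb', hu']
  refine ⟨by rw [length_pvRound, hlen], ?_, ?_, ?_⟩
  · intro j hj; rw [Nat.testBit_xor, hbh _ hj, rotHigh _ hj]; rfl
  · intro j hj
    rw [Nat.testBit_land, hmask, Nat.testBit_xor, Nat.testBit_two_pow_sub_one,
        huh _ hj, rotHigh _ hj]
    simp
  · intro k hk
    -- previous position
    have hprev : rot.testBit k = (ls.getD (if k = 0 then L - 1 else k - 1) 0 == 1) := by
      rw [rotBit k hk]
      by_cases hk0 : k = 0 <;> simp only [hk0, if_true, if_false, ite_true, ite_false]
      · exact (hmain (L - 1) (by omega)).1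
      · exact (hmain (k - 1) (by omega)).1
    have hval : (pvRound ls).getD k 0 =
        if rot.testBit k then pvTog (ls.getD k 0) else ls.getD k 0 := by
      rw [pvRound_getD ls k (by omega), hprev, hlen]
      by_cases hc : (ls.getD (if k = 0 then L - 1 else k - 1) 0 == 1) = true
      · rw [hc]; by_cases hk0 : k = 0 <;> simp [hk0] at hc ⊢ <;> simp [hc]
      · simp at hc
        by_cases hk0 : k = 0 <;> simp [hk0] at hc ⊢ <;> simp [hc]
    have hbk := (hmain k hk).1
    have hnew_bit : (b ^^^ rot).testBit k = ((pvRound ls).getD k 0 == 1) := by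
      rw [Nat.testBit_xor, hval, hbk]
      by_cases hr : rot.testBit k
      · rw [hr]
        simp only [pvTog]
        by_cases hx : ls.getD k 0 = 1 <;>
          simp only [List.getD_eq_getElem?_getD] at hx <;> simp [hx]
      · have hrf : rot.testBit k = false := by simpa using hr
        rw [hrf]
        simp
    have hu_split : (u &&& (((1 <<< L) - 1) ^^^ rot)).testBit k = (u.testBit k && !rot.testBit k) := by
      rw [Nat.testBit_land, hmask, Nat.testBit_xor, Nat.testBit_two_pow_sub_one]
      have hkL : k < L := hk
      simp [hkL]
    refine ⟨hnew_bit, ?_, ?_⟩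
    · intro hu
      rw [hu_split] at hu
      simp only [Bool.and_eq_true] at hu
      obtain ⟨hu1, hu2⟩ := hu
      have hrk : rot.testBit k = false := by simpa using hu2
      rw [hval, hrk, if_neg (by simp)]
      exact (hmain k hk).2.1 hu1
    · intro hu
      rw [hu_split] at hu
      rw [hnew_bit]
      by_cases hr : rot.testBit k = true
      · rw [hval, hr, if_pos rfl]
        simp only [pvTog]
        by_cases hx : ls.getD k 0 = 1 <;>
          simp only [List.getD_eq_getElem?_getD] at hx <;> simp [hx]
      · have hrf : rot.testBit k = false := by simpa using hr
        have huf : u.testBit k = false := by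
          rw [hrf] at hu; simpa using hu
        rw [hval, hrf, if_neg (by simp)]
        have hvv := (hmain k hk).2.2 huf
        rw [hvv, hbk]
        by_cases hx : ls.getD k 0 = 1 <;>
          simp only [List.getD_eq_getElem?_getD] at hx <;> simp [hx]

theorem shift_and_one (x k : Nat) : (x >>> k) &&& 1 = if x.testBit k then 1 else 0 := by
  rw [Nat.and_one_is_mod, Nat.shiftRight_eq_div_pow, Nat.testBit_eq_decide_div_mod_eq]
  by_cases h : x / 2 ^ k % 2 = 1
  · simp [h]
  · simp [h]; omega

theorem length_pvRound_iter (ls : List Int) (t : Nat) : (pvRound^[t] ls).length = ls.length := by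
  induction t with
  | zero => rfl
  | succ t ih => rw [Function.iterate_succ_apply', length_pvRound, ih]

theorem pvInv_iter (orig : List Int) (h0 : orig ≠ []) (b0 : Nat)
    (hinit : pvInv orig orig b0 ((1 <<< orig.length) - 1)) (t : Nat) :
    pvInv orig (pvRound^[t] orig)
      (((pyB_step orig.length ((1 <<< orig.length) - 1))^[t] (b0, (1 <<< orig.length) - 1)).1)
      (((pyB_step orig.length ((1 <<< orig.length) - 1))^[t] (b0, (1 <<< orig.length) - 1)).2) := by
  induction t with
  | zero => simpa using hinit
  | succ t ih =>
    rw [Function.iterate_succ_apply', Function.iterate_succ_apply']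
    have := pvInv_step orig (pvRound^[t] orig)
      (((pyB_step orig.length ((1 <<< orig.length) - 1))^[t] (b0, (1 <<< orig.length) - 1)).1)
      (((pyB_step orig.length ((1 <<< orig.length) - 1))^[t] (b0, (1 <<< orig.length) - 1)).2)
      h0 ih
    simpa using this

theorem fill_spec (bv uv : Nat) : ∀ (m : Nat) (cur : List Int),
    (((PySem.List.pyRange 0 (m : Int) 1).foldl
      (fun cur k => if ((uv >>> k.toNat) &&& 1) == 0 then
          cur.set k.toNat (((bv >>> k.toNat) &&& 1 : Nat) : Int) else cur) cur).length = cur.length) ∧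
    (∀ j, j < cur.length →
      ((PySem.List.pyRange 0 (m : Int) 1).foldl
        (fun cur k => if ((uv >>> k.toNat) &&& 1) == 0 then
            cur.set k.toNat (((bv >>> k.toNat) &&& 1 : Nat) : Int) else cur) cur).getD j 0
        = if j < m ∧ uv.testBit j = false then (if bv.testBit j then 1 else 0) else cur.getD j 0) := by
  intro m
  induction m with
  | zero =>
    intro cur
    rw [show ((0 : Nat) : Int) = 0 from rfl, PySem.List.pyRange_one_eq_nil (by omega)]
    exact ⟨rfl, fun j hj => by simp⟩
  | succ m ih =>
    intro cur
    have hcast : ((m + 1 : Nat) : Int) = (m : Int) + 1 := by push_cast; ring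
    rw [hcast, PySem.List.pyRange_one_succ_right (by positivity), List.foldl_append]
    obtain ⟨ihlen, ihget⟩ := ih cur
    simp only [List.foldl_cons, List.foldl_nil]
    constructor
    · by_cases hc : (((uv >>> (m : Int).toNat) &&& 1) == 0) = true
      · rw [if_pos hc, List.length_set, ihlen]
      · rw [if_neg hc]; exact ihlen
    · intro j hj
      have htB := shift_and_one uv m
      by_cases hu : uv.testBit m
      · have hc : ¬ (((uv >>> (m : Int).toNat) &&& 1) == 0) = true := by
          simp [Int.toNat_natCast, htB, hu]
        rw [if_neg hc, ihget j hj]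
        by_cases hjm : j < m
        · simp [hjm, show j < m + 1 from by omega]
        · by_cases hjm1 : j < m + 1
          · have : j = m := by omega
            subst this
            simp [hu, hjm]
          · simp [hjm, hjm1]
      · have hc : (((uv >>> (m : Int).toNat) &&& 1) == 0) = true := by
          simp [Int.toNat_natCast, htB, hu]
        rw [if_pos hc]
        rw [getD_set]
        simp only [Int.toNat_natCast, shift_and_one bv m]
        by_cases hjm : (m : Nat) = j
        · subst hjm
          rw [if_pos ⟨rfl, by rw [ihlen]; omega⟩]
          simp [hu]
        · rw [if_neg (by intro h; exact hjm h.1), ihget j hj]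
          by_cases hj1 : j < m
          · simp [hj1, show j < m + 1 from by omega]
          · have : ¬ j < m + 1 := by omega
            simp [hj1, this]

theorem pvInv_init (orig : List Int) :
    pvInv orig orig
      ((PySem.List.enumerate orig 0).foldl
        (fun (b : Nat) (p : Int × Int) => if p.2 == 1 then b ||| (1 <<< p.1.toNat) else b) 0)
      ((1 <<< orig.length) - 1) := by
  have henc : ∀ j, ((PySem.List.enumerate orig 0).foldl
      (fun (b : Nat) (p : Int × Int) => if p.2 == 1 then b ||| (1 <<< p.1.toNat) else b) 0).testBit j
      = (decide (j < orig.length) && (orig.getD j 0 == 1)) := by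
    intro j
    have h := encode_testBit orig 0 0 j
    simp only [Nat.cast_zero] at h
    rw [h]
    simp
  have hmaskbit : ∀ j, ((1 <<< orig.length) - 1).testBit j = decide (j < orig.length) := by
    intro j; rw [Nat.one_shiftLeft, Nat.testBit_two_pow_sub_one]
  refine ⟨rfl, ?_, ?_, ?_⟩
  · intro j hj; rw [henc]; simp [show ¬ (j < orig.length) from by omega]
  · intro j hj; rw [hmaskbit]; simp [show ¬ (j < orig.length) from by omega]
  · intro k hk
    refine ⟨?_, fun _ => rfl, ?_⟩
    · rw [henc]; simp [hk]
    · intro hu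
      rw [hmaskbit] at hu
      simp [hk] at hu

theorem main_eq (lights : List Int) (n : Int) : light_bulbs lights n = light_bulbs_alt lights n := by
  rcases eq_or_ne lights [] with rfl | hne
  · unfold light_bulbs light_bulbs_alt
    rw [List.foldl_const, Function.iterate_fixed (show pyA_round [] = [] from rfl)]
    rfl
  · unfold light_bulbs light_bulbs_alt
    rw [if_neg (by simpa using hne)]
    rw [List.foldl_const, show pyA_round = pvRound from funext pyA_round_eq_pvRound]
    dsimp only
    rw [List.foldl_const]
    have hinv := pvInv_iter lights hne
      ((PySem.List.enumerate lights 0).foldl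
        (fun (b : Nat) (p : Int × Int) => if p.2 == 1 then b ||| (1 <<< p.1.toNat) else b) 0)
      (pvInv_init lights) ((PySem.List.pyRange 0 n 1).length)
    obtain ⟨hlen2, hbh, huh, hmain⟩ := hinv
    obtain ⟨hflen, hfget⟩ := fill_spec
      (((pyB_step lights.length ((1 <<< lights.length) - 1))^[(PySem.List.pyRange 0 n 1).length]
        (((PySem.List.enumerate lights 0).foldl
          (fun (b : Nat) (p : Int × Int) => if p.2 == 1 then b ||| (1 <<< p.1.toNat) else b) 0),
          (1 <<< lights.length) - 1)).1)
      (((pyB_step lights.length ((1 <<< lights.length) - 1))^[(PySem.List.pyRange 0 n 1).length]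
        (((PySem.List.enumerate lights 0).foldl
          (fun (b : Nat) (p : Int × Int) => if p.2 == 1 then b ||| (1 <<< p.1.toNat) else b) 0),
          (1 <<< lights.length) - 1)).2)
      lights.length lights
    apply List.ext_getElem
    · rw [length_pvRound_iter, hflen]
    · intro k h1 h2
      rw [← List.getD_eq_getElem _ 0 h1, ← List.getD_eq_getElem _ 0 h2]
      have hkL : k < lights.length := by rwa [length_pvRound_iter] at h1
      rw [hfget k hkL]
      obtain ⟨hb, hu1, hu2⟩ := hmain k hkL
      by_cases hu : (((pyB_step lights.length ((1 <<< lights.length) - 1))^[(PySem.List.pyRange 0 n 1).length]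
        (((PySem.List.enumerate lights 0).foldl
          (fun (b : Nat) (p : Int × Int) => if p.2 == 1 then b ||| (1 <<< p.1.toNat) else b) 0),
          (1 <<< lights.length) - 1)).2).testBit k
      · rw [if_neg (by intro hcon; rw [hu] at hcon; simp at hcon)]
        exact hu1 hu
      · have huf := Bool.not_eq_true _ |>.mp hu
        rw [if_pos ⟨hkL, huf⟩]
        exact hu2 huf

-- ===== VERDICT (by name: the statement is the Claim_ definition above) =====
theorem light_bulbs_spec : Claim_equal_light_bulbs := by
  intro lights n _ _
  unfold Spec_light_bulbs
  exact main_eq lights n
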